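-- pv_equiv track=rewrite | github.com/aayush-thakkar2914/Test-HR-AI | app/services/ai_service.py | extract_relevant_content
-- ===== SOURCE A (Python) =====
-- from typing import List, Dict, Optional
--
-- def extract_relevant_content(content: str, query_words: List[str], max_length: int = 500) -> str:
--     """Extract most relevant content snippet from document"""
--     sentences = content.split('.')
--     scored_sentences = []
--
--     for sentence in sentences:
--         if len(sentence.strip()) < 10:
--             continue
--
--         score = 0
--         sentence_lower = sentence.lower()
--         for word in query_words:
--             if len(word) > 2 and word in sentence_lower:
--                 score += 1
--
--         if score > 0:
--             scored_sentences.append((sentence.strip(), score))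
--
--     # Sort by relevance and combine top sentences
--     scored_sentences.sort(key=lambda x: x[1], reverse=True)
--
--     result = ""
--     for sentence, _ in scored_sentences[:3]:
--         if len(result + sentence) < max_length:
--             result += sentence + ". "
--         else:
--             break
--
--     return result.strip() if result else content[:max_length] + "..."
-- ===== SOURCE B (Python) =====
-- def extract_relevant_content(content, query_words, max_length=500):
--     """Extract most relevant content snippet from document"""
--     effective = [w for w in query_words if len(w) > 2]
--
--     # single pass: keep only the 3 best (sentence, score) pairs, score
--     # descending, stable on ties (equal scores keep document order)
--     top3 = []
--     for raw in content.split('.'):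
--         sentence = raw.strip()
--         if len(sentence) < 10:
--             continue
--         low = raw.lower()
--         score = sum(1 for w in effective if w in low)
--         if score == 0:
--             continue
--         i = len(top3)
--         while i > 0 and top3[i - 1][1] < score:
--             i -= 1
--         top3.insert(i, (sentence, score))
--         del top3[3:]
--
--     result = ""
--     for sentence, _ in top3:
--         if len(result + sentence) < max_length:
--             result += sentence + ". "
--         else:
--             break
--
--     return result.strip() if result else content[:max_length] + "..."
-- ===== Notes on version B (the rewrite author's own statement) =====
-- stated objective: alternative
-- what changed: Instead of collecting every scored sentence and sorting the whole list before slicing [:3], B makes a single pass that maintains a bounded buffer of at most 3 best (sentence, score) pairs by stable descending insertion, truncating after each insert, so no full list is built and no sort runs; the word filter len(w)>2 is also hoisted out of the sentence loop.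
import Mathlib
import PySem

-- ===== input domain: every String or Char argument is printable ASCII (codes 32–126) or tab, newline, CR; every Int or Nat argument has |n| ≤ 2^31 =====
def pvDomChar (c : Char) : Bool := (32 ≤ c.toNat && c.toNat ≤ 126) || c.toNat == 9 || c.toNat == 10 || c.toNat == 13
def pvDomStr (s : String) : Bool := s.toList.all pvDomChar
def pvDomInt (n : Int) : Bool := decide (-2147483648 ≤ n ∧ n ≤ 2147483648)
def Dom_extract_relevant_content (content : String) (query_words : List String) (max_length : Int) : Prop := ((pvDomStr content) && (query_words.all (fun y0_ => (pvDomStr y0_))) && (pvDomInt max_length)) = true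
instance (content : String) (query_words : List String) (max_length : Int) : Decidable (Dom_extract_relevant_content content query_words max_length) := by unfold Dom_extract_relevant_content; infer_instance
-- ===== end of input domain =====

-- B replaces A's collect-all-then-sort-then-slice[:3] by a single pass that keeps a bounded
-- buffer of at most 3 (sentence, score) pairs via stable descending insertion (alternative
-- algorithm, same results; no speed is claimed).

-- shared helper: the identical final loop of both Pythons ('result += sentence + ". "' with break)
def pvCombine (max_length : Int) : List (List Char × Int) → List Char → List Char
  | [], res => res
  | (s, _) :: rest, res =>
    if ((res ++ s).length : Int) < max_length then pvCombine max_length rest (res ++ s ++ ['.', ' '])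
    else res

-- ===== PORT A =====
def extract_relevant_content (content : String) (query_words : List String) (max_length : Int) : String :=
  let sentences := PySem.Chars.splitOn content.toList ['.']
  let scored_sentences := sentences.foldl (fun acc sentence =>
      if (PySem.Chars.strip sentence).length < 10 then acc
      else
        let sentence_lower := PySem.Chars.lower sentence
        let score := query_words.foldl (fun sc word =>
            if decide (2 < PySem.Str.len word) && PySem.Chars.isIn word.toList sentence_lower then sc + 1 else sc) (0 : Int)
        if 0 < score then acc ++ [(PySem.Chars.strip sentence, score)] else acc) []
  let sortedS := PySem.List.sorted scored_sentences (fun x => x.2) true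
  let result := pvCombine max_length (sortedS.take 3) []
  if result ≠ [] then String.ofList (PySem.Chars.strip result)
  else String.ofList (PySem.Chars.slice content.toList none (some max_length) ++ "...".toList)

-- ===== PORT B =====
-- stable descending insertion (the while-loop insert of Source B)
def pvInsertDesc (x : List Char × Int) : List (List Char × Int) → List (List Char × Int)
  | [] => [x]
  | y :: ys => if y.2 < x.2 then x :: y :: ys else y :: pvInsertDesc x ys

def extract_relevant_content_alt (content : String) (query_words : List String) (max_length : Int) : String :=
  let effective := query_words.filter (fun w => decide (2 < PySem.Str.len w))
  let top3 := (PySem.Chars.splitOn content.toList ['.']).foldl (fun top raw =>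
      if (PySem.Chars.strip raw).length < 10 then top
      else
        if effective.countP (fun w => PySem.Chars.isIn w.toList (PySem.Chars.lower raw)) = 0 then top
        else (pvInsertDesc (PySem.Chars.strip raw,
          (effective.countP (fun w => PySem.Chars.isIn w.toList (PySem.Chars.lower raw)) : Int)) top).take 3) []
  let result := pvCombine max_length top3 []
  if result ≠ [] then String.ofList (PySem.Chars.strip result)
  else String.ofList (PySem.Chars.slice content.toList none (some max_length) ++ "...".toList)

-- ===== PRECONDITION & SPEC =====
def Spec_extract_relevant_content (content : String) (query_words : List String) (max_length : Int) (out : String) : Prop := out = extract_relevant_content_alt content query_words max_length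
instance (content : String) (query_words : List String) (max_length : Int) (out : String) : Decidable (Spec_extract_relevant_content content query_words max_length out) := by unfold Spec_extract_relevant_content; infer_instance

-- ===== CLAIM (what is proved, stated in full; the proofs are below) =====
def Claim_equal_extract_relevant_content : Prop := ∀ (content : String) (query_words : List String) (max_length : Int), Dom_extract_relevant_content content query_words max_length → Spec_extract_relevant_content content query_words max_length (extract_relevant_content content query_words max_length)

-- ===== LEMMAS AND PROOFS =====

-- A's per-sentence score (its inner foldl) and B's countP over the pre-filtered word list agree
theorem pv_score_eq (qws : List String) (low : List Char) (init : Int) :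
    qws.foldl (fun sc word => if decide (2 < PySem.Str.len word) && PySem.Chars.isIn word.toList low then sc + 1 else sc) init
      = init + (((qws.filter (fun w => decide (2 < PySem.Str.len w))).countP (fun w => PySem.Chars.isIn w.toList low) : Nat) : Int) := by
  induction qws generalizing init with
  | nil => simp
  | cons w t ih =>
    simp only [List.foldl_cons, List.filter_cons]
    by_cases h1 : 2 < w.length
    · by_cases h2 : PySem.Chars.isIn w.toList low = true
      · rw [if_pos (by simp [h1, h2]), ih, if_pos (by simp [h1]), List.countP_cons, if_pos h2]
        push_cast; ring
      · rw [if_neg (by simp [h2]), ih, if_pos (by simp [h1]), List.countP_cons, if_neg h2]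
        simp
    · rw [if_neg (by simp [h1]), ih, if_neg (by simp [h1])]

-- inserting into the truncated buffer and truncating equals truncating the full insertion
theorem pv_ins_take (x : List Char × Int) (l : List (List Char × Int)) (n : Nat) :
    (pvInsertDesc x (l.take n)).take n = (pvInsertDesc x l).take n := by
  induction l generalizing n with
  | nil => simp
  | cons y t ih =>
    cases n with
    | zero => simp
    | succ m =>
      simp only [List.take_succ_cons, pvInsertDesc]
      by_cases h : y.2 < x.2
      · simp only [h, if_true]
        cases m with
        | zero => simp
        | succ k => simp [List.take_take]
      · simp [h, ih]

-- the truncated insertion fold computes the take-3 of the full insertion fold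
theorem pv_fold_trunc (l : List (List Char × Int)) (acc : List (List Char × Int)) :
    l.foldl (fun t x => (pvInsertDesc x t).take 3) (acc.take 3)
      = (l.foldl (fun t x => pvInsertDesc x t) acc).take 3 := by
  induction l generalizing acc with
  | nil => rfl
  | cons x t ih =>
    simp only [List.foldl_cons]
    rw [pv_ins_take]
    exact ih (pvInsertDesc x acc)

-- Source B's insert is PySem's insertBy with the descending-stable comparison
theorem pv_ins_eq_insertBy (x : List Char × Int) (l : List (List Char × Int)) :
    pvInsertDesc x l = PySem.List.insertBy (fun a b => decide (b.2 < a.2)) x l := by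
  induction l with
  | nil => rfl
  | cons y t ih =>
    simp only [pvInsertDesc, PySem.List.insertBy]
    by_cases h : y.2 < x.2
    · simp [h]
    · simp [h, ih]

-- a conditional-append fold from any accumulator is the accumulator ++ the fold from []
theorem pv_foldl_filter_append {α β : Type} (c : α → Bool) (f : α → β) (l : List α) (acc : List β) :
    l.foldl (fun a s => if c s then a ++ [f s] else a) acc
      = acc ++ l.foldl (fun a s => if c s then a ++ [f s] else a) [] := by
  induction l generalizing acc with
  | nil => simp
  | cons s t ih =>
    simp only [List.foldl_cons]
    by_cases h : c s
    · simp only [h, if_true, List.nil_append]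
      rw [ih (acc ++ [f s]), ih [f s], List.append_assoc]
    · rw [if_neg h, if_neg h]
      exact ih acc

-- fusing: folding g over the conditionally collected items = doing g on the fly
theorem pv_fuse {α β γ : Type} (c : α → Bool) (f : α → β) (g : γ → β → γ) (l : List α) (acc : γ) :
    l.foldl (fun t s => if c s then g t (f s) else t) acc
      = (l.foldl (fun a s => if c s then a ++ [f s] else a) []).foldl g acc := by
  induction l generalizing acc with
  | nil => rfl
  | cons s t ih =>
    simp only [List.foldl_cons]
    by_cases h : c s
    · simp only [h, if_true, List.nil_append]
      rw [pv_foldl_filter_append, List.foldl_append, ih]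
      simp
    · rw [if_neg h, if_neg h]
      exact ih acc

-- proof-only abbreviations for the shared per-sentence data
def pvScoreB (qws : List String) (raw : List Char) : Nat :=
  (qws.filter (fun w => decide (2 < PySem.Str.len w))).countP (fun w => PySem.Chars.isIn w.toList (PySem.Chars.lower raw))

def pvC (qws : List String) (raw : List Char) : Bool :=
  !decide ((PySem.Chars.strip raw).length < 10) && !decide (pvScoreB qws raw = 0)

def pvF (qws : List String) (raw : List Char) : List Char × Int :=
  (PySem.Chars.strip raw, (pvScoreB qws raw : Int))

-- THE key fact: B's bounded-buffer fold = take 3 of A's sort of its collected scored list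
theorem pv_key (qws : List String) (sentences : List (List Char)) :
    sentences.foldl (fun top raw =>
      if (PySem.Chars.strip raw).length < 10 then top
      else
        if (qws.filter (fun w => decide (2 < PySem.Str.len w))).countP (fun w => PySem.Chars.isIn w.toList (PySem.Chars.lower raw)) = 0 then top
        else (pvInsertDesc (PySem.Chars.strip raw,
          ((qws.filter (fun w => decide (2 < PySem.Str.len w))).countP (fun w => PySem.Chars.isIn w.toList (PySem.Chars.lower raw)) : Int)) top).take 3) []
      = (PySem.List.sorted
          (sentences.foldl (fun acc sentence =>
            if (PySem.Chars.strip sentence).length < 10 then acc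
            else
              if 0 < qws.foldl (fun sc word => if decide (2 < PySem.Str.len word) && PySem.Chars.isIn word.toList (PySem.Chars.lower sentence) then sc + 1 else sc) (0 : Int) then acc ++ [(PySem.Chars.strip sentence, qws.foldl (fun sc word => if decide (2 < PySem.Str.len word) && PySem.Chars.isIn word.toList (PySem.Chars.lower sentence) then sc + 1 else sc) (0 : Int))] else acc) [])
          (fun x => x.2) true).take 3 := by
  have hscore : ∀ raw : List Char, qws.foldl (fun sc word => if decide (2 < PySem.Str.len word) && PySem.Chars.isIn word.toList (PySem.Chars.lower raw) then sc + 1 else sc) (0 : Int) = (pvScoreB qws raw : Int) := by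
    intro raw
    simpa [pvScoreB] using pv_score_eq qws (PySem.Chars.lower raw) 0
  have hA : (fun (acc : List (List Char × Int)) sentence =>
        if (PySem.Chars.strip sentence).length < 10 then acc
        else
          if 0 < qws.foldl (fun sc word => if decide (2 < PySem.Str.len word) && PySem.Chars.isIn word.toList (PySem.Chars.lower sentence) then sc + 1 else sc) (0 : Int) then acc ++ [(PySem.Chars.strip sentence, qws.foldl (fun sc word => if decide (2 < PySem.Str.len word) && PySem.Chars.isIn word.toList (PySem.Chars.lower sentence) then sc + 1 else sc) (0 : Int))] else acc)
      = fun acc s => if pvC qws s then acc ++ [pvF qws s] else acc := by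
    funext acc s
    rw [hscore s]
    by_cases h1 : (PySem.Chars.strip s).length < 10
    · rw [if_pos h1, if_neg (by simp [pvC, h1])]
    · by_cases h2 : pvScoreB qws s = 0
      · rw [if_neg h1, if_neg (by simp [h2]), if_neg (by simp [pvC, h1, h2])]
      · have hpos : 0 < (pvScoreB qws s : Int) := by
          have := Nat.pos_of_ne_zero h2; exact_mod_cast this
        rw [if_neg h1, if_pos hpos, if_pos (by simp [pvC, h1, h2])]
        rfl
  have hB : (fun (top : List (List Char × Int)) raw =>
        if (PySem.Chars.strip raw).length < 10 then top
        else
          if (qws.filter (fun w => decide (2 < PySem.Str.len w))).countP (fun w => PySem.Chars.isIn w.toList (PySem.Chars.lower raw)) = 0 then top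
          else (pvInsertDesc (PySem.Chars.strip raw,
            ((qws.filter (fun w => decide (2 < PySem.Str.len w))).countP (fun w => PySem.Chars.isIn w.toList (PySem.Chars.lower raw)) : Int)) top).take 3)
      = fun top s => if pvC qws s then (pvInsertDesc (pvF qws s) top).take 3 else top := by
    funext top s
    by_cases h1 : (PySem.Chars.strip s).length < 10
    · rw [if_pos h1, if_neg (by simp [pvC, h1])]
    · by_cases h2 : pvScoreB qws s = 0
      · rw [if_neg h1, if_pos (show List.countP (fun w => PySem.Chars.isIn w.toList (PySem.Chars.lower s)) (List.filter (fun w => decide (2 < PySem.Str.len w)) qws) = 0 from h2), if_neg (by simp [pvC, h1, h2])]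
      · rw [if_neg h1, if_neg (show ¬ (List.countP (fun w => PySem.Chars.isIn w.toList (PySem.Chars.lower s)) (List.filter (fun w => decide (2 < PySem.Str.len w)) qws) = 0) from h2), if_pos (by simp [pvC, h1, h2])]
        rfl
  rw [hA, hB, pv_fuse (pvC qws) (pvF qws) (fun t x => (pvInsertDesc x t).take 3)]
  have h0 : ([] : List (List Char × Int)) = ([] : List (List Char × Int)).take 3 := rfl
  rw [h0, pv_fold_trunc]
  congr 1
  have hins : (fun (t : List (List Char × Int)) x => pvInsertDesc x t)
      = fun t x => PySem.List.insertBy (fun a b => decide (b.2 < a.2)) x t := by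
    funext t x; exact pv_ins_eq_insertBy x t
  rw [hins]
  exact (PySem.List.sorted_rev_eq_foldl_insertBy _ _).symm

-- ===== VERDICT (by name: the statement is the Claim_ definition above) =====
theorem extract_relevant_content_spec : Claim_equal_extract_relevant_content := by
  intro content query_words max_length _
  unfold Spec_extract_relevant_content
  simp only [extract_relevant_content, extract_relevant_content_alt]
  rw [pv_key query_words (PySem.Chars.splitOn content.toList ['.'])]
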